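-- pv_equiv track=rewrite | github.com/joshanashakya/dissertation | workspace/dataset/java-python/GeeksForGeeks/1237/A/2.py | calculateAreaSum
-- ===== SOURCE A (Python) =====
-- def calculateAreaSum(l, b):
--     size = 1
--
--     # Square with max size possible
--     maxSize = min(l, b)
--
--     totalArea = 0
--
--     for i in range(1, maxSize + 1 ):
--
--         # calculate total square
--         # of a given size
--         totalSquares = ((l - size + 1) *
--                         (b - size + 1))
--
--         # calculate area of squares
--         # of a particular size
--         area = (totalSquares *
--                 size * size)
--
--         # total area
--         totalArea += area
--
--         # increment size
--         size += 1
--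
--     return totalArea
-- ===== SOURCE B (Python) =====
-- def calculateAreaSum(l, b):
--     m = min(l, b)
--     if m <= 0:
--         return 0
--     s2 = m * (m + 1) * (2 * m + 1) // 6
--     s3 = (m * (m + 1) // 2) ** 2
--     s4 = m * (m + 1) * (2 * m + 1) * (3 * m * m + 3 * m - 1) // 30
--     return (l + 1) * (b + 1) * s2 - (l + b + 2) * s3 + s4
-- ===== Notes on version B (the rewrite author's own statement) =====
-- stated objective: faster
-- what changed: Replaces A's loop over every square size 1..min(l,b) with a closed-form polynomial evaluated via the power-sum formulas for sum(k^2), sum(k^3), sum(k^4).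
import Mathlib
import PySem

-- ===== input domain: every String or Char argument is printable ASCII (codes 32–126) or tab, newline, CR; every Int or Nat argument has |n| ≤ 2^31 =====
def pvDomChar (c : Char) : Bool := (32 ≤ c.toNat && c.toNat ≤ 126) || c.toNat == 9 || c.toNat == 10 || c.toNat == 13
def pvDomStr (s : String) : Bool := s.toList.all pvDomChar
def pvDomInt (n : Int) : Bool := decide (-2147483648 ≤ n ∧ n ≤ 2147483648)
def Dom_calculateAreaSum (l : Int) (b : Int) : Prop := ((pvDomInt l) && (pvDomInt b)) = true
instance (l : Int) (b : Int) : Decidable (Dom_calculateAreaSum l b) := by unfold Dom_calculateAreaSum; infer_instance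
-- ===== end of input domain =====

-- B replaces A's O(min(l,b)) loop by an O(1) closed form built from the power sums Σk², Σk³, Σk⁴.

-- ===== PORT A =====
def calculateAreaSum (l : Int) (b : Int) : Int :=
  let maxSize := min l b
  let st := (PySem.List.pyRange 1 (maxSize + 1) 1).foldl
    (fun (st : Int × Int) _i =>
      let size := st.1
      let totalArea := st.2
      let totalSquares := (l - size + 1) * (b - size + 1)
      let area := totalSquares * size * size
      (size + 1, totalArea + area)) (1, 0)
  st.2

-- ===== PORT B =====
def calculateAreaSum_alt (l : Int) (b : Int) : Int :=
  let m := min l b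
  if m ≤ 0 then 0
  else
    let s2 := PySem.Int.floordiv (m * (m + 1) * (2 * m + 1)) 6
    let s3 := (PySem.Int.floordiv (m * (m + 1)) 2) ^ 2
    let s4 := PySem.Int.floordiv (m * (m + 1) * (2 * m + 1) * (3 * m * m + 3 * m - 1)) 30
    (l + 1) * (b + 1) * s2 - (l + b + 2) * s3 + s4

-- ===== PRECONDITION & SPEC =====
def Spec_calculateAreaSum (l : Int) (b : Int) (out : Int) : Prop := out = calculateAreaSum_alt l b
instance (l : Int) (b : Int) (out : Int) : Decidable (Spec_calculateAreaSum l b out) := by unfold Spec_calculateAreaSum; infer_instance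

-- ===== CLAIM (what is proved, stated in full; the proofs are below) =====
def Claim_equal_calculateAreaSum : Prop := ∀ (l : Int) (b : Int), Dom_calculateAreaSum l b → Spec_calculateAreaSum l b (calculateAreaSum l b)

-- ===== LEMMAS AND PROOFS =====

-- the exact value of A's loop after n iterations, as a recursive sum
def pvSumA (l b : Int) : Nat → Int
  | 0 => 0
  | n + 1 => pvSumA l b n +
      (l - ((n : Int) + 1) + 1) * (b - ((n : Int) + 1) + 1) * ((n : Int) + 1) * ((n : Int) + 1)

theorem pvLoop (l b : Int) (n : Nat) :
    ((PySem.List.pyRange 1 ((n : Int) + 1) 1).foldl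
      (fun (st : Int × Int) _i =>
        (st.1 + 1, st.2 + (l - st.1 + 1) * (b - st.1 + 1) * st.1 * st.1)) (1, 0))
      = ((n : Int) + 1, pvSumA l b n) := by
  induction n with
  | zero => simp [PySem.List.pyRange_one_eq_nil, pvSumA]
  | succ n ih =>
    rw [show ((n + 1 : Nat) : Int) + 1 = ((n : Int) + 1) + 1 by push_cast; ring,
        PySem.List.pyRange_one_succ_right (by omega), List.foldl_append, ih]
    simp [pvSumA]

theorem pvClosed (l b : Int) (n : Nat) :
    60 * pvSumA l b n =
      10 * (l + 1) * (b + 1) * ((n : Int) * (n + 1) * (2 * n + 1))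
      - 15 * (l + b + 2) * ((n : Int) * (n + 1)) ^ 2
      + 2 * ((n : Int) * (n + 1) * (2 * n + 1)) * (3 * (n : Int) ^ 2 + 3 * n - 1) := by
  induction n with
  | zero => simp [pvSumA]
  | succ n ih =>
    have h : pvSumA l b (n + 1) = pvSumA l b n +
        (l - ((n : Int) + 1) + 1) * (b - ((n : Int) + 1) + 1) * ((n : Int) + 1) * ((n : Int) + 1) := rfl
    rw [h]
    push_cast [mul_add] at *
    ring_nf
    ring_nf at ih
    linarith

theorem pvDvd6 (n : Nat) : (6 : Int) ∣ (n : Int) * (n + 1) * (2 * n + 1) := by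
  induction n with
  | zero => simp
  | succ n ih =>
    have h : ((n + 1 : Nat) : Int) * ((n + 1 : Nat) + 1) * (2 * (n + 1 : Nat) + 1)
        = (n : Int) * (n + 1) * (2 * n + 1) + 6 * ((n : Int) + 1) ^ 2 := by push_cast; ring
    rw [h]
    exact dvd_add ih ⟨((n : Int) + 1) ^ 2, rfl⟩

theorem pvDvd2 (n : Nat) : (2 : Int) ∣ (n : Int) * (n + 1) := by
  induction n with
  | zero => simp
  | succ n ih =>
    have h : ((n + 1 : Nat) : Int) * ((n + 1 : Nat) + 1)
        = (n : Int) * (n + 1) + 2 * ((n : Int) + 1) := by push_cast; ring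
    rw [h]
    exact dvd_add ih ⟨(n : Int) + 1, rfl⟩

theorem pvDvd30 (n : Nat) :
    (30 : Int) ∣ (n : Int) * (n + 1) * (2 * n + 1) * (3 * (n : Int) * n + 3 * n - 1) := by
  induction n with
  | zero => simp
  | succ n ih =>
    have h : ((n + 1 : Nat) : Int) * ((n + 1 : Nat) + 1) * (2 * (n + 1 : Nat) + 1) *
          (3 * ((n + 1 : Nat) : Int) * (n + 1 : Nat) + 3 * (n + 1 : Nat) - 1)
        = (n : Int) * (n + 1) * (2 * n + 1) * (3 * (n : Int) * n + 3 * n - 1)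
          + 30 * ((n : Int) + 1) ^ 4 := by push_cast; ring
    rw [h]
    exact dvd_add ih ⟨((n : Int) + 1) ^ 4, rfl⟩

-- ===== VERDICT (by name: the statement is the Claim_ definition above) =====
theorem calculateAreaSum_spec : Claim_equal_calculateAreaSum := by
  intro l b _
  unfold Spec_calculateAreaSum calculateAreaSum calculateAreaSum_alt
  by_cases hm : min l b ≤ 0
  · simp only [hm, if_true]
    rw [PySem.List.pyRange_one_eq_nil (by omega)]
    rfl
  · simp only [hm, if_false]
    rw [not_le] at hm
    set m := min l b with hmdef
    obtain ⟨n, hn⟩ : ∃ n : Nat, m = (n : Int) := ⟨m.toNat, (Int.toNat_of_nonneg (le_of_lt hm)).symm⟩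
    rw [hn]
    rw [pvLoop l b n]
    obtain ⟨q2, hq2⟩ := pvDvd6 n
    obtain ⟨q3, hq3⟩ := pvDvd2 n
    obtain ⟨q4, hq4⟩ := pvDvd30 n
    have e2 : PySem.Int.floordiv ((n : Int) * ((n : Int) + 1) * (2 * (n : Int) + 1)) 6 = q2 := by
      rw [PySem.Int.floordiv_eq_ediv_of_pos (by norm_num), hq2,
        Int.mul_ediv_cancel_left _ (by norm_num)]
    have e3 : PySem.Int.floordiv ((n : Int) * ((n : Int) + 1)) 2 = q3 := by
      rw [PySem.Int.floordiv_eq_ediv_of_pos (by norm_num), hq3,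
        Int.mul_ediv_cancel_left _ (by norm_num)]
    have e4 : PySem.Int.floordiv ((n : Int) * ((n : Int) + 1) * (2 * (n : Int) + 1) *
        (3 * (n : Int) * (n : Int) + 3 * (n : Int) - 1)) 30 = q4 := by
      rw [PySem.Int.floordiv_eq_ediv_of_pos (by norm_num), hq4,
        Int.mul_ediv_cancel_left _ (by norm_num)]
    simp only [e2, e3, e4]
    have h60 : (60 : Int) * pvSumA l b n =
        60 * ((l + 1) * (b + 1) * q2 - (l + b + 2) * q3 ^ 2 + q4) := by
      rw [pvClosed l b n]
      have hq2' : (n : Int) * ((n : Int) + 1) * (2 * (n : Int) + 1) = 6 * q2 := hq2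
      have hq3' : (n : Int) * ((n : Int) + 1) = 2 * q3 := hq3
      have hq4' : (n : Int) * ((n : Int) + 1) * (2 * (n : Int) + 1) *
          (3 * (n : Int) * (n : Int) + 3 * (n : Int) - 1) = 30 * q4 := hq4
      linear_combination 10 * (l + 1) * (b + 1) * hq2'
        - 15 * (l + b + 2) * ((n : Int) * ((n : Int) + 1) + 2 * q3) * hq3' + 2 * hq4'
    exact (mul_left_cancel₀ (by norm_num : (60:Int) ≠ 0) h60)
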